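-- pv_equiv track=rewrite | github.com/lesyeuxdelamour/PythonStudyingPTIT | PYKT094.py | calc
-- ===== SOURCE A (Python) =====
-- def calc(ID, wage, days):
--     group = ID[0]
--     years = int(ID[1:3])
--     table = {
--         'A': [(1, 3, 10), (4, 8, 12), (9, 15, 14), (16, 100, 20)],
--         'B': [(1, 3, 10), (4, 8, 11), (9, 15, 13), (16, 100, 16)],
--         'C': [(1, 3, 9), (4, 8, 10), (9, 15, 12), (16, 100, 14)],
--         'D': [(1, 3, 8), (4, 8, 9), (9, 15, 11), (16, 100, 13)]
--     }
--     for start, end, coefficient in table[group]: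
--         if start <= years <= end:
--             return coefficient * wage * days * 1000
--     return 0
-- ===== SOURCE B (Python) =====
-- def calc(ID, wage, days):
--     coeffs = {'A': [10, 12, 14, 20],
--               'B': [10, 11, 13, 16],
--               'C': [9, 10, 12, 14],
--               'D': [8, 9, 11, 13]}
--     row = coeffs[ID[0]]
--     years = int(ID[1:3])
--     if years < 1 or years > 100:
--         return 0
--     bucket = (years > 3) + (years > 8) + (years > 15)
--     return row[bucket] * wage * days * 1000
-- ===== Notes on version B (the rewrite author's own statement) =====
-- stated objective: simpler
-- what changed: Replaces the linear scan over (start,end,coefficient) range triples with a per-group flat 4-coefficient list indexed by an arithmetically computed age bucket.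
import Mathlib
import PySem

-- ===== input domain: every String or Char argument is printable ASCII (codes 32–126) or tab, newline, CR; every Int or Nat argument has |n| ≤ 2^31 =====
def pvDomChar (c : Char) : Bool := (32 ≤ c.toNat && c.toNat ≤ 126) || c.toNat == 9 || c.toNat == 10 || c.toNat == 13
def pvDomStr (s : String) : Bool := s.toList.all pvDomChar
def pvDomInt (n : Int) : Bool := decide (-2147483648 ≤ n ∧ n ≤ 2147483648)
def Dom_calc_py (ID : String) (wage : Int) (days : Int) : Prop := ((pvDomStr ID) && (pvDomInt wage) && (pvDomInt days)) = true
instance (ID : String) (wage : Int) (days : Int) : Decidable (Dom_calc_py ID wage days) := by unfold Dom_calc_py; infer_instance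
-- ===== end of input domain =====

-- B replaces A's linear scan over (start,end,coefficient) range triples by a flat
-- per-group coefficient list indexed by an arithmetically computed age bucket (objective: simpler).

-- ===== PORT A =====
-- table[group]: the dict lookup; none = KeyError
def calcTableA (g : Char) : Option (List (Int × Int × Int)) :=
  if g = 'A' then some [(1, 3, 10), (4, 8, 12), (9, 15, 14), (16, 100, 20)]
  else if g = 'B' then some [(1, 3, 10), (4, 8, 11), (9, 15, 13), (16, 100, 16)]
  else if g = 'C' then some [(1, 3, 9), (4, 8, 10), (9, 15, 12), (16, 100, 14)]
  else if g = 'D' then some [(1, 3, 8), (4, 8, 9), (9, 15, 11), (16, 100, 13)]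
  else none

-- the for-loop with early return
def calcScanA (years wage days : Int) : List (Int × Int × Int) → Int
  | [] => 0
  | (s, e, c) :: rest =>
    if s ≤ years ∧ years ≤ e then c * wage * days * 1000
    else calcScanA years wage days rest

def calc_py (ID : String) (wage : Int) (days : Int) : Int :=
  match PySem.Str.pyGet? ID 0 with           -- ID[0]; none = IndexError (excluded by Pre_)
  | none => 0
  | some group =>
    match PySem.Int.ofStr? (PySem.Str.slice ID (some 1) (some 3)) with  -- int(ID[1:3]); none = ValueError (excluded)
    | none => 0
    | some years =>
      match calcTableA group with            -- none = KeyError (excluded)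
      | none => 0
      | some rows => calcScanA years wage days rows

-- ===== PORT B =====
def calcCoeffsB (g : Char) : Option (List Int) :=
  if g = 'A' then some [10, 12, 14, 20]
  else if g = 'B' then some [10, 11, 13, 16]
  else if g = 'C' then some [9, 10, 12, 14]
  else if g = 'D' then some [8, 9, 11, 13]
  else none

def calc_py_alt (ID : String) (wage : Int) (days : Int) : Int :=
  match PySem.Str.pyGet? ID 0 with
  | none => 0
  | some g =>
    match calcCoeffsB g with
    | none => 0
    | some row =>
      match PySem.Int.ofStr? (PySem.Str.slice ID (some 1) (some 3)) with
      | none => 0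
      | some years =>
        if years < 1 ∨ 100 < years then 0
        else
          let bucket : Int := (if 3 < years then 1 else 0) + (if 8 < years then 1 else 0)
            + (if 15 < years then 1 else 0)
          (PySem.List.pyGet? row bucket).getD 0 * wage * days * 1000

-- ===== PRECONDITION & SPEC =====
-- Pre_ excludes exactly the inputs where A raises: empty ID (IndexError),
-- a first character outside 'A'..'D' (KeyError), or ID[1:3] not an int literal (ValueError).
def Pre_calc_py (ID : String) (wage : Int) (days : Int) : Prop :=
  (PySem.Str.pyGet? ID 0 = some 'A' ∨ PySem.Str.pyGet? ID 0 = some 'B' ∨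
   PySem.Str.pyGet? ID 0 = some 'C' ∨ PySem.Str.pyGet? ID 0 = some 'D') ∧
  (PySem.Int.ofStr? (PySem.Str.slice ID (some 1) (some 3))).isSome = true
instance (ID : String) (wage : Int) (days : Int) : Decidable (Pre_calc_py ID wage days) := by
  unfold Pre_calc_py; infer_instance

def pvWitness_calc_py : String × Int × Int := ("A05", 7, 3)

def Spec_calc_py (ID : String) (wage : Int) (days : Int) (out : Int) : Prop := out = calc_py_alt ID wage days
instance (ID : String) (wage : Int) (days : Int) (out : Int) : Decidable (Spec_calc_py ID wage days out) := by unfold Spec_calc_py; infer_instance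

-- ===== CLAIM (what is proved, stated in full; the proofs are below) =====
def Claim_equal_calc_py : Prop := ∀ (ID : String) (wage : Int) (days : Int), Dom_calc_py ID wage days → Pre_calc_py ID wage days → Spec_calc_py ID wage days (calc_py ID wage days)

-- ===== LEMMAS AND PROOFS =====
lemma scan_eq_bucket (c1 c2 c3 c4 years wage days : Int) :
    calcScanA years wage days [(1, 3, c1), (4, 8, c2), (9, 15, c3), (16, 100, c4)] =
      (if years < 1 ∨ 100 < years then 0
       else (PySem.List.pyGet? [c1, c2, c3, c4] ((if 3 < years then 1 else 0)
            + (if 8 < years then 1 else 0) + (if 15 < years then 1 else 0))).getD 0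
            * wage * days * 1000) := by
  simp only [calcScanA]
  split_ifs <;> first | rfl | omega

-- ===== VERDICT (by name: the statement is the Claim_ definition above) =====
theorem calc_py_spec : Claim_equal_calc_py := by
  intro ID wage days _ hpre
  obtain ⟨hg, hy⟩ := hpre
  obtain ⟨y, hy⟩ := Option.isSome_iff_exists.mp hy
  unfold Spec_calc_py calc_py calc_py_alt
  rcases hg with h | h | h | h <;>
    · simp only [h, hy]
      norm_num [calcTableA, calcCoeffsB]
      exact scan_eq_bucket _ _ _ _ y wage days
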